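-- pv_equiv track=rewrite | github.com/Deepstatsanalysis/algoexpert-1 | Shivam/Array/Apartment Hunting.py | Finalarray
-- ===== SOURCE A (Python) =====
-- def Finalarray(abc):
--     minvalue=float("inf")
--     indexmin=0
--     for i in range(len(abc)-1):
--         if abc[i]<minvalue:
--             minvalue=abc[i]
--             indexmin=i
--
--
--
--     return indexmin
-- ===== SOURCE B (Python) =====
-- def Finalarray(abc):
--     order = sorted(range(len(abc) - 1), key=lambda i: abc[i])
--     return order[0] if order else 0
-- ===== Notes on version B (the rewrite author's own statement) =====
-- stated objective: alternative
-- what changed: Replaces A's single min-tracking scan by sorting the prefix indices with the element value as key (a stable sort preserves first-occurrence tie-breaking) and returning the first index of the sorted order, 0 when there is none.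
import Mathlib
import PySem

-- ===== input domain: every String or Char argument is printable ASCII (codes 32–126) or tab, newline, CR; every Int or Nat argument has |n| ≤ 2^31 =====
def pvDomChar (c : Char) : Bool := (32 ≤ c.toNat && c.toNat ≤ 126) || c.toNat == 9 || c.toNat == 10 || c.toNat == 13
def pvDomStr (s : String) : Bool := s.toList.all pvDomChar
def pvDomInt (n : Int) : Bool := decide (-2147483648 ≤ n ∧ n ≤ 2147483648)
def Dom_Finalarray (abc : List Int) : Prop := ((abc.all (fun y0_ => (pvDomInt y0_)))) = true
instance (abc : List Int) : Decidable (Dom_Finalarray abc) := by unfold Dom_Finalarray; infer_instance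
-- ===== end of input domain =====

-- B replaces A's single min-tracking scan by a sort: it sorts the prefix indices
-- stably by element value and returns the first index of the sorted order (0 when
-- there is none); an alternative algorithm, not claimed faster.

-- ===== PORT A =====
-- state: (minvalue, indexmin); float("inf") is modelled as `none` (any int is below it)
def Finalarray (abc : List Int) : Int :=
  (((PySem.List.pyRange 0 ((abc.length : Int) - 1) 1).foldl
      (fun (s : Option Int × Int) i =>
        let ai := PySem.List.pyGetD abc i 0
        match s.1 with
        | none => (some ai, i)
        | some v => if ai < v then (some ai, i) else s)
      (none, 0)) : Option Int × Int).2

-- ===== PORT B =====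
def Finalarray_alt (abc : List Int) : Int :=
  let order := PySem.List.sorted (PySem.List.pyRange 0 ((abc.length : Int) - 1) 1)
      (fun i => PySem.List.pyGetD abc i 0)
  match order with
  | [] => 0
  | k :: _ => k

-- ===== PRECONDITION & SPEC =====
def Spec_Finalarray (abc : List Int) (out : Int) : Prop := out = Finalarray_alt abc
instance (abc : List Int) (out : Int) : Decidable (Spec_Finalarray abc out) := by unfold Spec_Finalarray; infer_instance

-- ===== CLAIM (what is proved, stated in full; the proofs are below) =====
def Claim_equal_Finalarray : Prop := ∀ (abc : List Int), Dom_Finalarray abc → Spec_Finalarray abc (Finalarray abc)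

-- ===== LEMMAS AND PROOFS =====

-- the head of the running stable insertion sort, as an optional "best so far"
def pvStepO (key : Int → Int) (o : Option Int) (x : Int) : Option Int :=
  match o with
  | none => some x
  | some h => if key x < key h then some x else some h

-- inserting into acc changes the head exactly as pvStepO changes the "best so far"
lemma pv_head_insertBy (key : Int → Int) (x : Int) (acc : List Int) :
    (PySem.List.insertBy (fun a b => decide (key a < key b)) x acc).head?
      = pvStepO key acc.head? x := by
  cases acc with
  | nil => simp [PySem.List.insertBy, pvStepO]
  | cons y ys =>
    by_cases h : key x < key y <;>
      simp [PySem.List.insertBy, pvStepO, h]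

-- the head of the whole insertion-sort fold is the pvStepO-fold of the heads
lemma pv_head_foldl_insertBy (key : Int → Int) (l : List Int) (acc : List Int) :
    (l.foldl (fun acc x => PySem.List.insertBy (fun a b => decide (key a < key b)) x acc) acc).head?
      = l.foldl (pvStepO key) acc.head? := by
  induction l generalizing acc with
  | nil => rfl
  | cons x r ih =>
    simp only [List.foldl_cons, ih, pv_head_insertBy]

-- A's state is the "best so far" tagged with its value: the two folds agree
lemma pv_foldA_eq (abc : List Int) (l : List Int) (o : Option Int) :
    l.foldl
      (fun (s : Option Int × Int) i =>
        let ai := PySem.List.pyGetD abc i 0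
        match s.1 with
        | none => (some ai, i)
        | some v => if ai < v then (some ai, i) else s)
      (match o with
       | none => (none, 0)
       | some h => (some (PySem.List.pyGetD abc h 0), h))
      = (match l.foldl (pvStepO (fun i => PySem.List.pyGetD abc i 0)) o with
         | none => (none, 0)
         | some h => (some (PySem.List.pyGetD abc h 0), h)) := by
  induction l generalizing o with
  | nil => rfl
  | cons x r ih =>
    cases o with
    | none =>
      simpa [pvStepO] using ih (some x)
    | some h =>
      by_cases hlt : PySem.List.pyGetD abc x 0 < PySem.List.pyGetD abc h 0
      · simpa [pvStepO, hlt] using ih (some x)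
      · simpa [pvStepO, hlt] using ih (some h)

-- ===== VERDICT (by name: the statement is the Claim_ definition above) =====
theorem Finalarray_spec : Claim_equal_Finalarray := by
  intro abc _
  unfold Spec_Finalarray Finalarray Finalarray_alt
  rw [PySem.List.sorted_eq_foldl_insertBy]
  set key : Int → Int := fun i => PySem.List.pyGetD abc i 0 with hkey
  set l := PySem.List.pyRange 0 ((abc.length : Int) - 1) 1 with hl
  have hA := pv_foldA_eq abc l none
  have hB := pv_head_foldl_insertBy key l []
  simp only [List.head?_nil] at hB
  cases hres : l.foldl (pvStepO key) none with
  | none =>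
    rw [hres] at hA hB
    rw [hA]
    rcases hnil : l.foldl
        (fun acc x => PySem.List.insertBy (fun a b => decide (key a < key b)) x acc) [] with
      _ | ⟨k, t⟩
    · simp
    · rw [hnil] at hB; simp at hB
  | some h =>
    rw [hres] at hA hB
    rw [hA]
    rcases hcons : l.foldl
        (fun acc x => PySem.List.insertBy (fun a b => decide (key a < key b)) x acc) [] with
      _ | ⟨k, t⟩
    · rw [hcons] at hB; simp at hB
    · rw [hcons] at hB
      simp at hB
      simp [hB]
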